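-- pv_equiv track=rewrite | github.com/ZhaoxiongChen/FinalYearProject | ShipDetection/DataPrep.py | calculate_label
-- ===== SOURCE A (Python) =====
-- def calculate_label(input):
--     has_ship = 0
--     no_ship = 0
--     for n in input:
--         if n == '1':
--             has_ship += 1
--         else:
--             no_ship += 1
--     data = [has_ship, no_ship]
--     return data
-- ===== SOURCE B (Python) =====
-- def calculate_label(input):
--     freq = {}
--     for n in input:
--         freq[n] = freq.get(n, 0) + 1
--     has_ship = freq.get('1', 0)
--     no_ship = sum(c for k, c in freq.items() if k != '1')
--     return [has_ship, no_ship]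
-- ===== Notes on version B (the rewrite author's own statement) =====
-- stated objective: alternative
-- what changed: Builds a frequency histogram (dict) of all strings in one pass, then reads the '1' bucket and sums the remaining buckets, instead of A's branching two-counter loop.
import Mathlib
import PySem

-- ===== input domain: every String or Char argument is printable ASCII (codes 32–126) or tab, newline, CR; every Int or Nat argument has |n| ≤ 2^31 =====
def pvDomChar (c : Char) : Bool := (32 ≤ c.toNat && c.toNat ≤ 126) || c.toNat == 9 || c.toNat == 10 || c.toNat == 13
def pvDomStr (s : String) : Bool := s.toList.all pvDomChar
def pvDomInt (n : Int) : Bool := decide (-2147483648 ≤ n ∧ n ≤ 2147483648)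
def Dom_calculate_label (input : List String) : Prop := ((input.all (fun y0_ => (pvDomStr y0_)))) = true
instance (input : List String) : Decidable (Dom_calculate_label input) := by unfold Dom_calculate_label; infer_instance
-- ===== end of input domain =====

-- B replaces A's branching two-counter loop with a frequency histogram (dict) built in one pass,
-- reading the "1" bucket and summing the other buckets (alternative data structure, same cost).
-- ===== PORT A =====
def calculate_label (input : List String) : List Int :=
  let r := input.foldl (fun (st : Int × Int) n =>
    if n == "1" then (st.1 + 1, st.2) else (st.1, st.2 + 1)) (0, 0)
  [r.1, r.2]

-- ===== PORT B =====
def calculate_label_alt (input : List String) : List Int :=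
  let freq : PySem.Dict String Int :=
    input.foldl (fun d n => d.insert n (d.getD n 0 + 1)) PySem.Dict.empty
  let has_ship : Int := freq.getD "1" 0
  let no_ship : Int :=
    (freq.items.filter (fun kv => kv.1 ≠ "1")).foldl (fun s kv => s + kv.2) 0
  [has_ship, no_ship]

-- ===== PRECONDITION & SPEC =====
def Spec_calculate_label (input : List String) (out : List Int) : Prop := out = calculate_label_alt input
instance (input : List String) (out : List Int) : Decidable (Spec_calculate_label input out) := by unfold Spec_calculate_label; infer_instance

-- ===== CLAIM =====
def Claim_equal_calculate_label : Prop := ∀ (input : List String), Dom_calculate_label input → Spec_calculate_label input (calculate_label input)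

-- ===== LEMMAS AND PROOFS =====

-- A's loop computes (count of "1", length - count of "1").
lemma cl_foldl_inv (input : List String) (a b : Int) :
    input.foldl (fun (st : Int × Int) n =>
      if n == "1" then (st.1 + 1, st.2) else (st.1, st.2 + 1)) (a, b)
    = (a + input.count "1", b + ((input.length : Int) - input.count "1")) := by
  induction input generalizing a b with
  | nil => simp
  | cons h t ih =>
    simp only [List.foldl_cons]
    by_cases hh : h = "1"
    · rw [if_pos (by simp [hh]), ih]
      simp [hh, Prod.ext_iff]
      omega
    · rw [if_neg (by simp [hh]), ih]
      simp [hh, Prod.ext_iff]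
      omega

-- folding + of second components equals the sum of the mapped second components
lemma cl_foldl_add_snd (l : List (String × Int)) (s : Int) :
    l.foldl (fun s kv => s + kv.2) s = s + (l.map (fun kv => kv.2)).sum := by
  induction l generalizing s with
  | nil => simp
  | cons h t ih =>
    rw [List.foldl_cons, ih, List.map_cons, List.sum_cons]
    ring

-- sum of a pointwise addition splits
lemma cl_sum_map_add (l : List String) (f g : String → Int) :
    (l.map (fun a => f a + g a)).sum = (l.map f).sum + (l.map g).sum := by
  induction l with
  | nil => simp
  | cons a r ih =>
    simp only [List.map_cons, List.sum_cons, ih]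
    ring

-- the sum of the indicator of x over a list is x's count in it
lemma cl_sum_indicator (x : String) (l : List String) :
    (l.map (fun k => if x = k then (1 : Int) else 0)).sum = (l.count x : Int) := by
  induction l with
  | nil => simp
  | cons a r ih =>
    rw [List.map_cons, List.sum_cons, ih]
    by_cases h : x = a
    · rw [if_pos h, List.count_cons, if_pos (by simp [h])]
      push_cast
      ring
    · rw [if_neg h, List.count_cons, if_neg (by simp; exact fun hh => h hh.symm)]
      push_cast
      ring

-- the "1"-count and the rest-count partition the length
lemma cl_count_split (input : List String) :
    input.count "1" + input.countP (fun k => k ≠ "1") = input.length := by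
  induction input with
  | nil => rfl
  | cons a t ih =>
    rw [List.count_cons, List.countP_cons, List.length_cons]
    by_cases h : a = "1"
    · rw [if_pos (by simp [h]), if_neg (by simp [h])]
      omega
    · rw [if_neg (by simp; exact h), if_pos (by simpa using h)]
      omega

-- summing xs.count over the keys ≠ "1" of a nodup key list covering xs gives countP (≠ "1")
lemma cl_sum_counts (xs : List String) (l : List String) (hnd : l.Nodup)
    (hsub : ∀ x ∈ xs, x ∈ l) :
    ((l.filter (fun k => k ≠ "1")).map (fun k => (xs.count k : Int))).sum
      = (xs.countP (fun k => k ≠ "1") : Int) := by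
  induction xs with
  | nil => simp
  | cons x t ih =>
    have hx : x ∈ l := hsub x (List.mem_cons_self)
    have hsub' : ∀ y ∈ t, y ∈ l := fun y hy => hsub y (List.mem_cons_of_mem _ hy)
    have hcount : ∀ k ∈ l.filter (fun k => k ≠ "1"),
        ((x :: t).count k : Int) = (t.count k : Int) + (if x = k then 1 else 0) := by
      intro k _
      by_cases h : x = k
      · rw [List.count_cons, if_pos (by simp [h]), if_pos h]
        push_cast; ring
      · rw [List.count_cons, if_neg (by simp; exact h), if_neg h]
        push_cast; ring
    rw [List.map_congr_left hcount,
      cl_sum_map_add (l.filter (fun k => k ≠ "1"))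
        (fun k => (t.count k : Int)) (fun k => if x = k then (1 : Int) else 0),
      cl_sum_indicator, ih hsub']
    have hndf : (l.filter (fun k => k ≠ "1")).Nodup := hnd.filter _
    by_cases hx1 : x = "1"
    · have hnm : x ∉ l.filter (fun k => k ≠ "1") := by
        simp [List.mem_filter, hx1]
      rw [List.count_eq_zero_of_not_mem hnm, List.countP_cons, if_neg (by simp [hx1])]
      push_cast; ring
    · have hxm : x ∈ l.filter (fun k => k ≠ "1") := by
        simp [List.mem_filter, hx, hx1]
      rw [List.count_eq_one_of_mem hndf hxm, List.countP_cons, if_pos (by simp [hx1])]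
      push_cast; ring

-- B's filtered items are the filtered keys, mapped
lemma cl_filter_items (input : List String) :
    ((PySem.Set.ofList input).map (fun k => (k, (input.count k : Int)))).filter
        (fun kv => kv.1 ≠ "1")
      = ((PySem.Set.ofList input).filter (fun k => k ≠ "1")).map
        (fun k => (k, (input.count k : Int))) := by
  rw [List.filter_map]
  rfl

theorem calculate_label_spec : Claim_equal_calculate_label := by
  intro input _
  unfold Spec_calculate_label calculate_label calculate_label_alt
  simp only [cl_foldl_inv, PySem.Dict.foldl_insert_getD_add_one_eq_counter,
    PySem.Dict.getD_counter, PySem.Dict.items_counter, cl_filter_items,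
    cl_foldl_add_snd, List.map_map, Function.comp_def]
  rw [cl_sum_counts input (PySem.Set.ofList input)
    (PySem.Set.nodup_ofList input) (fun x hx => (PySem.Set.mem_ofList input x).mpr hx)]
  have hlen := cl_count_split input
  simp only [List.cons.injEq, and_true]
  exact ⟨by omega, by omega⟩
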